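-- pv_equiv track=rewrite | github.com/maxencepenaud/Midterm | midterm exam maxence penaud.py | find_c_jeb_patterns
-- ===== SOURCE A (Python) =====
-- def find_c_jeb_patterns(text):
--     """
--     Find patterns that start with 'C', have an unlimited number of letters, and end with 'jeb'.
--     :param text: The text to search within.
--     :return: The number of matches found.
--     """
--     count = 0  # Initialize counter for matches
--     punctuation = ",!?.\n"  # Define punctuation marks to be removed
--
--     # Replace each punctuation mark with a space to avoid concatenating words
--     for p in punctuation:
--         text = text.replace(p, " ")
--
--     # Split the text into words
--     words = text.split()
--
--     # Iterate through each word in the list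
--     for word in words:
--         # Check if the word starts with 'C' and ends with 'jeb'
--         if word.startswith('C') and word.endswith('jeb'):
--             count += 1  # Increment counter for each match
--
--     return count
--
-- text = "This is a test text with Cabcjeb and another Cdefghijeb, also Cjeb."
-- ===== SOURCE B (Python) =====
-- def find_c_jeb_patterns(text):
--     """Count delimiter-separated words that start with 'C' and end with 'jeb', in a single pass."""
--     count = 0
--     word = ""
--     for ch in text + " ":
--         if ch in ",!?.\n \t\r\x0b\x0c":
--             if word.startswith('C') and word.endswith('jeb'):
--                 count += 1
--             word = ""
--         else:
--             word += ch
--     return count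
-- ===== Notes on version B (the rewrite author's own statement) =====
-- stated objective: alternative
-- what changed: A builds five intermediate replaced strings, splits into a word list and scans it; B makes a single left-to-right pass over the characters, accumulating the current word and counting a match each time a delimiter (punctuation or whitespace) flushes a word.
import Mathlib
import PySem

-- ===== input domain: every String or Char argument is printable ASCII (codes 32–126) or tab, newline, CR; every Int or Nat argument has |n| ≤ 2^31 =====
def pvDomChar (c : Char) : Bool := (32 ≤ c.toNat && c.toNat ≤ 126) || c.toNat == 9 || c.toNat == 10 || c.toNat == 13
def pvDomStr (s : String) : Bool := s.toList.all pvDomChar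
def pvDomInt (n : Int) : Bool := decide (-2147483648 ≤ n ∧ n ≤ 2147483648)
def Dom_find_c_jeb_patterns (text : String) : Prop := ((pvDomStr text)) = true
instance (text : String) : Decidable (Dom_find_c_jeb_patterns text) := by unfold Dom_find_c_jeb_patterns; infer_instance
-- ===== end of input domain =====

-- B replaces A's replace-then-split-then-scan pipeline with a single left-to-right pass
-- that tokenizes and counts in one loop (objective: alternative; no speed claim).


-- ===== PORT A =====
-- for p in ",!?.\n": text = text.replace(p, " "); words = text.split(); count the matching words
def find_c_jeb_patterns (text : String) : Int :=
  let text1 := ([',', '!', '?', '.', '\n'] : List Char).foldl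
    (fun t p => PySem.Str.replace t (String.ofList [p]) " ") text
  let words := PySem.Str.split₀ text1
  words.foldl (fun count word =>
    if PySem.Str.startswith word "C" && PySem.Str.endswith word "jeb" then count + 1 else count) 0

-- ===== PORT B =====
-- the loop body of Source B: state = (count so far, current word)
def pvBStep (st : Int × List Char) (c : Char) : Int × List Char :=
  if c ∈ ([',', '!', '?', '.', '\n', ' ', '\t', '\r', '\x0b', '\x0c'] : List Char) then
    (if PySem.Chars.startswith st.2 ['C'] && PySem.Chars.endswith st.2 ['j', 'e', 'b'] then
       st.1 + 1 else st.1, [])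
  else (st.1, st.2 ++ [c])

-- for ch in text + " ": …
def find_c_jeb_patterns_alt (text : String) : Int :=
  ((text.toList ++ [' ']).foldl pvBStep (0, [])).1

-- ===== PRECONDITION & SPEC =====
def Spec_find_c_jeb_patterns (text : String) (out : Int) : Prop := out = find_c_jeb_patterns_alt text
instance (text : String) (out : Int) : Decidable (Spec_find_c_jeb_patterns text out) := by unfold Spec_find_c_jeb_patterns; infer_instance

-- ===== CLAIM (what is proved, stated in full; the proofs are below) =====
def Claim_equal_find_c_jeb_patterns : Prop := ∀ (text : String), Dom_find_c_jeb_patterns text → Spec_find_c_jeb_patterns text (find_c_jeb_patterns text)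

-- ===== LEMMAS AND PROOFS =====

-- the character substitution A's five replace calls perform
def pvSubst (c : Char) : Char :=
  if c ∈ ([',', '!', '?', '.', '\n'] : List Char) then ' ' else c

-- the word test, on the list side
def pvP (w : List Char) : Bool :=
  PySem.Chars.startswith w ['C'] && PySem.Chars.endswith w ['j', 'e', 'b']

lemma char_eq_of_toNat (c d : Char) (h : c.toNat = d.toNat) : c = d := by
  rcases c with ⟨⟨cv, hc⟩, pc⟩; rcases d with ⟨⟨dv, hd⟩, pd⟩
  simp [Char.toNat] at h
  simp_all

lemma replace_go_single (p n : Char) :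
    ∀ (l : List Char) (fuel : Nat) (acc : List Char), l.length ≤ fuel →
      PySem.Chars.replace.go [p] [n] fuel l acc
        = acc.reverse ++ l.map (fun c => if c = p then n else c) := by
  intro l
  induction l with
  | nil =>
    intro fuel acc h
    cases fuel <;> simp [PySem.Chars.replace.go]
  | cons c t ih =>
    intro fuel acc h
    cases fuel with
    | zero => simp at h
    | succ m =>
      simp only [PySem.Chars.replace.go]
      by_cases hp : c = p
      · subst hp
        rw [if_pos (by simp [List.isPrefixOf])]
        simp only [List.length_singleton, List.drop_one, List.tail_cons]
        rw [ih m _ (by simp at h; omega)]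
        simp
      · rw [if_neg (by simp [List.isPrefixOf, Ne.symm hp])]
        rw [ih m _ (by simp at h; omega)]
        simp [hp]

-- replacing a single character by a single character is a map
lemma replace_single (p n : Char) (s : List Char) :
    PySem.Chars.replace s [p] [n] = s.map (fun c => if c = p then n else c) := by
  simp [PySem.Chars.replace]
  rw [replace_go_single p n s s.length [] le_rfl]
  simp

-- A's five replaces compose to pvSubst
lemma foldl_replace_eq_map (s : String) :
    (([',', '!', '?', '.', '\n'] : List Char).foldl
      (fun t p => PySem.Str.replace t (String.ofList [p]) " ") s).toList
      = s.toList.map pvSubst := by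
  simp only [List.foldl_cons, List.foldl_nil, PySem.Str.toList_replace,
    String.toList_ofList]
  have hsp : (" " : String).toList = [' '] := by decide
  rw [hsp]
  simp only [replace_single, List.map_map]
  apply List.map_congr_left
  intro c _
  simp only [Function.comp, pvSubst]
  by_cases h1 : c = ',' <;> by_cases h2 : c = '!' <;> by_cases h3 : c = '?' <;>
    by_cases h4 : c = '.' <;> by_cases h5 : c = '\n' <;> simp_all

-- split₀.go's accumulator prepends
lemma split₀_go_acc : ∀ (l cur : List Char) (acc : List (List Char)),
    PySem.Chars.split₀.go l cur acc = acc.reverse ++ PySem.Chars.split₀.go l cur [] := by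
  intro l
  induction l with
  | nil =>
    intro cur acc
    simp only [PySem.Chars.split₀.go]
    by_cases h : cur.isEmpty <;> simp [h]
  | cons c t ih =>
    intro cur acc
    simp only [PySem.Chars.split₀.go]
    by_cases hs : PySem.Chars.isspace c
    · by_cases he : cur.isEmpty <;> simp only [hs, he, if_true]
      · rw [ih [] acc]
      · rw [ih [] (cur.reverse :: acc), ih [] [cur.reverse]]
        simp
    · simp only [hs, Bool.false_eq_true, if_false]
      rw [ih (c :: cur) acc]

-- B's separator test agrees with "is whitespace after substitution" on domain chars
lemma sep_eq (c : Char) (h : pvDomChar c = true) :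
    decide (c ∈ ([',', '!', '?', '.', '\n', ' ', '\t', '\r', '\x0b', '\x0c'] : List Char))
      = PySem.Chars.isspace (pvSubst c) := by
  by_cases hp : c ∈ ([',', '!', '?', '.', '\n'] : List Char)
  · have hs : pvSubst c = ' ' := by simp [pvSubst, hp]
    rw [hs]
    fin_cases hp <;> decide
  · have hsub : pvSubst c = c := by simp [pvSubst, hp]
    rw [hsub]
    simp only [List.mem_cons, List.not_mem_nil, or_false] at hp ⊢
    push_neg at hp
    obtain ⟨h1, h2, h3, h4, h5⟩ := hp
    by_cases hA : c = ' '
    · subst hA; decide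
    by_cases hB : c = '\t'
    · subst hB; decide
    by_cases hC : c = '\r'
    · subst hC; decide
    by_cases hD : c = '\x0b'
    · subst hD; decide
    by_cases hE : c = '\x0c'
    · subst hE; decide
    · have L : decide (c = ',' ∨ c = '!' ∨ c = '?' ∨ c = '.' ∨ c = '\n' ∨ c = ' ' ∨
          c = '\t' ∨ c = '\r' ∨ c = '\x0b' ∨ c = '\x0c') = false := by
        simp [h1, h2, h3, h4, h5, hA, hB, hC, hD, hE]
      rw [L]
      have fdom : (32 ≤ c.toNat ∧ c.toNat ≤ 126) ∨ c.toNat = 9 ∨ c.toNat = 10 ∨ c.toNat = 13 := by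
        have h' := h; simp [pvDomChar] at h'; tauto
      have fA : c.toNat ≠ 32 := fun he => hA (char_eq_of_toNat c ' ' (by simpa using he))
      have fB : c.toNat ≠ 9 := fun he => hB (char_eq_of_toNat c '\t' (by simpa using he))
      have fC : c.toNat ≠ 13 := fun he => hC (char_eq_of_toNat c '\r' (by simpa using he))
      have f5 : c.toNat ≠ 10 := fun he => h5 (char_eq_of_toNat c '\n' (by simpa using he))
      symm
      simp only [PySem.Chars.isspace]
      simp only [Bool.or_eq_false_iff, Bool.and_eq_false_iff, decide_eq_false_iff_not]
      omega

lemma pvP_nil : pvP [] = false := by decide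

lemma go_nil_word (cur : List Char) (he : ¬ cur = []) :
    PySem.Chars.split₀.go ([] : List Char) cur.reverse [] = [cur] := by
  simp only [PySem.Chars.split₀.go]
  rw [if_neg (by simpa using he)]
  simp

-- flushing the current word adds its contribution in front of the remaining count
lemma count_step (cur : List Char) (cnt : Int) (rest : List (List Char)) :
    (if pvP cur then cnt + 1 else cnt) + (rest.countP pvP : Int)
      = cnt + (((PySem.Chars.split₀.go ([] : List Char) cur.reverse []) ++ rest).countP pvP : Int) := by
  by_cases he : cur = []
  · subst he
    simp [PySem.Chars.split₀.go, pvP_nil]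
  · rw [go_nil_word cur he]
    by_cases hP : pvP cur <;> simp [hP, List.countP_cons] <;> push_cast <;> ring

-- a whitespace head flushes the current word
lemma go_space_split (c : Char) (hs : PySem.Chars.isspace c = true) (l w : List Char) :
    PySem.Chars.split₀.go (c :: l) w.reverse []
      = PySem.Chars.split₀.go ([] : List Char) w.reverse [] ++ PySem.Chars.split₀.go l [] [] := by
  by_cases he : w = []
  · subst he; simp [PySem.Chars.split₀.go, hs]
  · have h1 : w.reverse.isEmpty = false := by simp [he]
    simp only [PySem.Chars.split₀.go, hs, if_true, h1, Bool.false_eq_true, if_false]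
    rw [split₀_go_acc l [] [w.reverse.reverse]]

-- main invariant: B's fold counts exactly the matching words of the substituted remainder
lemma main_inv : ∀ (l cur : List Char) (cnt : Int),
    (∀ c ∈ l, pvDomChar c = true) →
    ((l ++ [' ']).foldl pvBStep (cnt, cur)).1
      = cnt + ((PySem.Chars.split₀.go (l.map pvSubst) cur.reverse []).countP pvP : Int) := by
  intro l
  induction l with
  | nil =>
    intro cur cnt _
    simp only [List.nil_append, List.foldl_cons, List.foldl_nil, List.map_nil]
    rw [show pvBStep (cnt, cur) ' ' = (if pvP cur then cnt + 1 else cnt, []) from by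
      simp [pvBStep, pvP]]
    simpa using count_step cur cnt []
  | cons c t ih =>
    intro cur cnt hdom
    have hc := hdom c (List.mem_cons_self)
    have hsep := sep_eq c hc
    simp only [List.cons_append, List.foldl_cons, List.map_cons]
    by_cases hmem : c ∈ ([',', '!', '?', '.', '\n', ' ', '\t', '\r', '\x0b', '\x0c'] : List Char)
    · have hspace : PySem.Chars.isspace (pvSubst c) = true := by
        rw [← hsep]; simpa using hmem
      rw [show pvBStep (cnt, cur) c = (if pvP cur then cnt + 1 else cnt, []) from by
        simp [pvBStep, pvP, hmem]]
      rw [ih [] _ (fun d hd => hdom d (List.mem_cons_of_mem _ hd))]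
      rw [go_space_split (pvSubst c) hspace (t.map pvSubst) cur]
      simpa using count_step cur cnt (PySem.Chars.split₀.go (t.map pvSubst) [] [])
    · have hspace : PySem.Chars.isspace (pvSubst c) = false := by
        rw [← hsep]; simpa using hmem
      rw [show pvBStep (cnt, cur) c = (cnt, cur ++ [c]) from by simp [pvBStep, hmem]]
      rw [ih (cur ++ [c]) _ (fun d hd => hdom d (List.mem_cons_of_mem _ hd))]
      have hid : pvSubst c = c := by
        simp only [pvSubst, ite_eq_right_iff]
        intro hin
        exact absurd (by simp [List.mem_cons] at hin ⊢; tauto) hmem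
      rw [hid] at hspace ⊢
      simp only [PySem.Chars.split₀.go, hspace, Bool.false_eq_true, if_false,
        List.reverse_append, List.reverse_cons, List.reverse_nil, List.nil_append,
        List.singleton_append]

-- ===== VERDICT (by name: the statement is the Claim_ definition above) =====
set_option maxHeartbeats 2000000 in
theorem find_c_jeb_patterns_spec : Claim_equal_find_c_jeb_patterns := by
  intro text hdom
  have hd : ∀ c ∈ text.toList, pvDomChar c = true := by
    have h' := hdom
    simp only [Dom_find_c_jeb_patterns, pvDomStr, List.all_eq_true] at h'
    exact h'
  simp only [Spec_find_c_jeb_patterns, find_c_jeb_patterns, find_c_jeb_patterns_alt]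
  rw [PySem.List.foldl_count_if (fun word => PySem.Str.startswith word "C" && PySem.Str.endswith word "jeb")]
  rw [main_inv text.toList [] 0 hd]
  have hsplit : (([',', '!', '?', '.', '\n'] : List Char).foldl
      (fun t p => PySem.Str.replace t (String.ofList [p]) " ") text).toList
      = text.toList.map pvSubst := foldl_replace_eq_map text
  have hcnt : List.countP
        (fun word => PySem.Str.startswith word "C" && PySem.Str.endswith word "jeb")
        (PySem.Str.split₀ (([',', '!', '?', '.', '\n'] : List Char).foldl
          (fun t p => PySem.Str.replace t (String.ofList [p]) " ") text))
      = List.countP pvP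
          (PySem.Chars.split₀.go (text.toList.map pvSubst) List.nil.reverse []) := by
    rw [PySem.Str.split₀, List.countP_map, PySem.Chars.split₀, hsplit]
    apply List.countP_congr
    intro w _
    simp [PySem.Str.startswith, PySem.Str.endswith, pvP,
      PySem.Chars.startswith, PySem.Chars.endswith]
  rw [hcnt]
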